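-- pv_equiv track=rewrite | github.com/ingong/Py_Algorithm | Programmers-Level2/4주차 직업군 추천하기.py | solution
-- ===== SOURCE A (Python) =====
-- def solution(table, languages, preference):
--     answer = {}
--     for score_str in table:
--         score_list = score_str.split()
--         for lang, pref in zip(languages, preference):
--             if lang in score_list:
--                 answer[score_list[0]] = answer.get(score_list[0], 0) + (6 - score_list.index(lang)) * pref
--             else:
--                 pass
--
--     return sorted(answer.items(), key = lambda x : [-x[1], x[0]])[0][0]
-- ===== SOURCE B (Python) =====
-- def solution(table, languages, preference):
--     # Aggregate preference per language once (duplicate languages add up,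
--     # exactly as A's pair-by-pair loop does).
--     pref = {}
--     for lang, p in zip(languages, preference):
--         pref[lang] = pref.get(lang, 0) + p
--     answer = {}
--     for row in table:
--         tokens = row.split()
--         matched = [tok for tok in dict.fromkeys(tokens) if tok in pref]
--         if matched:
--             gain = sum((6 - tokens.index(tok)) * pref[tok] for tok in matched)
--             answer[tokens[0]] = answer.get(tokens[0], 0) + gain
--     return sorted(answer.items(), key=lambda x: [-x[1], x[0]])[0][0]
-- ===== Notes on version B (the rewrite author's own statement) =====
-- stated objective: faster
-- what changed: B pre-aggregates preferences into one dict keyed by language and makes a single pass over each row's distinct tokens with one answer-dict update per row, instead of A's per-row scan of every (language, preference) pair with a linear membership test and .index into the row.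
import Mathlib
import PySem

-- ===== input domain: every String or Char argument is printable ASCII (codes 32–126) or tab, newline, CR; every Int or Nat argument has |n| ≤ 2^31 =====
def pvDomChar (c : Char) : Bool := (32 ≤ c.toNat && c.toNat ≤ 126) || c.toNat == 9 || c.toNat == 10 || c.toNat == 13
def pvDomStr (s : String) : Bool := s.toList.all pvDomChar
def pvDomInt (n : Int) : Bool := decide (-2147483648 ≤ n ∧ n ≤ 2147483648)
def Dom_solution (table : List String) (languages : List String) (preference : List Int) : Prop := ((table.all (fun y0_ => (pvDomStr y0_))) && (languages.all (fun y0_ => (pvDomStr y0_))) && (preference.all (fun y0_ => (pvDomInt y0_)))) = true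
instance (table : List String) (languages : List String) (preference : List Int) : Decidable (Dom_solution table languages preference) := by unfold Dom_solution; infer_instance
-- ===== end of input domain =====

-- B replaces A's per-row scan of the preference list (membership + .index into the row)
-- by one prebuilt aggregated preference dict and a single pass over the row's distinct
-- tokens, doing one answer-dict update per row.  Return value only; nothing is mutated.

-- ===== PORT A =====
-- score_list[0] and score_list.index(lang) are only reached under 'lang in score_list',
-- so headD ""/getD 0 below compute exactly Python's values there; the final [0][0]
-- raises IndexError on the empty dict — excluded by Pre_solution.
def solution (table : List String) (languages : List String) (preference : List Int) : String :=
  let answer : PySem.Dict String Int :=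
    table.foldl (fun answer score_str =>
      let score_list := PySem.Str.split₀ score_str
      (languages.zip preference).foldl (fun answer lp =>
        if lp.1 ∈ score_list then
          answer.insert (score_list.headD "")
            (answer.getD (score_list.headD "") 0 +
              (6 - (((PySem.List.index? score_list lp.1).getD 0 : Nat) : Int)) * lp.2)
        else answer) answer) PySem.Dict.empty
  ((PySem.List.sorted2 answer.items (fun x => -x.2) (fun x => x.1)).headD ("", 0)).1

-- ===== PORT B =====
def solution_alt (table : List String) (languages : List String) (preference : List Int) : String :=
  let pref : PySem.Dict String Int :=
    (languages.zip preference).foldl (fun d lp => d.insert lp.1 (d.getD lp.1 0 + lp.2)) PySem.Dict.empty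
  let answer : PySem.Dict String Int :=
    table.foldl (fun answer row =>
      let tokens := PySem.Str.split₀ row
      let matched := (PySem.List.dedup tokens).filter (fun t => pref.contains t)
      if matched.isEmpty then answer
      else
        let gain := (matched.map (fun t =>
          (6 - (((PySem.List.index? tokens t).getD 0 : Nat) : Int)) * pref.getD t 0)).sum
        answer.insert (tokens.headD "") (answer.getD (tokens.headD "") 0 + gain)) PySem.Dict.empty
  ((PySem.List.sorted2 answer.items (fun x => -x.2) (fun x => x.1)).headD ("", 0)).1

-- ===== PRECONDITION & SPEC =====
-- Pre_: some table row contains some zipped language, i.e. the answer dict is nonempty;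
-- otherwise A's final [0][0] raises IndexError (B's min over the empty dict raises too).
def Pre_solution (table : List String) (languages : List String) (preference : List Int) : Prop :=
  (table.any (fun row => (languages.zip preference).any
    (fun lp => decide (lp.1 ∈ PySem.Str.split₀ row)))) = true
instance (table : List String) (languages : List String) (preference : List Int) : Decidable (Pre_solution table languages preference) := by unfold Pre_solution; infer_instance
def pvWitness_solution : List String × List String × List Int := (["si 5 3 1", "co 4 2 1"], ["si", "co"], [3, 2])
def Spec_solution (table : List String) (languages : List String) (preference : List Int) (out : String) : Prop := out = solution_alt table languages preference
instance (table : List String) (languages : List String) (preference : List Int) (out : String) : Decidable (Spec_solution table languages preference out) := by unfold Spec_solution; infer_instance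

-- ===== CLAIM (what is proved, stated in full; the proofs are below) =====
def Claim_equal_solution : Prop := ∀ (table : List String) (languages : List String) (preference : List Int), Dom_solution table languages preference → Pre_solution table languages preference → Spec_solution table languages preference (solution table languages preference)

-- ===== LEMMAS AND PROOFS =====

-- L1: repeated add-at-one-key fold
theorem pvFoldKey {α : Type} (k : String) (f : α → Int) (l : List α) (d : PySem.Dict String Int) :
    l.foldl (fun d x => d.insert k (d.getD k 0 + f x)) d
    = if l.isEmpty then d else d.insert k (d.getD k 0 + (l.map f).sum) := by
  induction l generalizing d with
  | nil => simp
  | cons x t ih =>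
    simp only [List.foldl_cons, ih, List.isEmpty_cons, List.map_cons, List.sum_cons]
    by_cases h : t.isEmpty = true
    · simp [List.isEmpty_iff.mp h]
    · simp only [h, if_false, Bool.false_eq_true]
      rw [PySem.Dict.getD_insert_self, PySem.Dict.insert_insert_self]
      ring_nf

-- sum over filter = sum of ite
theorem pvSumFilter {α : Type} (p : α → Bool) (f : α → Int) (l : List α) :
    ((l.filter p).map f).sum = (l.map (fun x => if p x then f x else 0)).sum := by
  induction l with
  | nil => rfl
  | cons x t ih => by_cases h : p x <;> simp [h, ih]

-- sum of ite-eq over Nodup list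
theorem pvSumIteSingle (l : List String) (hl : l.Nodup) (a : String) (c : Int) :
    (l.map (fun t => if t = a then c else 0)).sum = if a ∈ l then c else 0 := by
  induction l with
  | nil => simp
  | cons x t ih =>
    simp only [List.nodup_cons] at hl
    by_cases h : x = a
    · subst h
      simp [hl.1, ih hl.2]
    · simp [h, ih hl.2, Ne.symm h]

-- abbreviations for this task
def pvW (ts : List String) (t : String) : Int := 6 - (((PySem.List.index? ts t).getD 0 : Nat) : Int)
def pvSB (ts : List String) (P : PySem.Dict String Int) : Int :=
  ((PySem.List.dedup ts).map (fun t => if P.contains t then pvW ts t * P.getD t 0 else 0)).sum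
def pvPref (zs : List (String × Int)) : PySem.Dict String Int :=
  zs.foldl (fun d lp => d.insert lp.1 (d.getD lp.1 0 + lp.2)) PySem.Dict.empty

-- point lemma
theorem pvSB_insert (ts : List String) (P : PySem.Dict String Int) (l : String) (p : Int) :
    pvSB ts (P.insert l (P.getD l 0 + p)) = pvSB ts P + (if l ∈ ts then pvW ts l * p else 0) := by
  unfold pvSB
  have hmap : (PySem.List.dedup ts).map
      (fun t => if (P.insert l (P.getD l 0 + p)).contains t then pvW ts t * (P.insert l (P.getD l 0 + p)).getD t 0 else 0)
      = (PySem.List.dedup ts).map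
      (fun t => (if P.contains t then pvW ts t * P.getD t 0 else 0) + (if t = l then pvW ts l * p else 0)) := by
    apply List.map_congr_left
    intro t _
    rw [PySem.Dict.getD_insert, PySem.Dict.contains_insert]
    by_cases h : t = l
    · subst h
      simp only [BEq.rfl, Bool.true_or]
      by_cases hc : P.contains t
      · simp [hc]; ring
      · rw [PySem.Dict.getD_of_not_contains P (0:Int) (by simpa using hc)]
        simp [hc]
    · simp [h]
  have hnd : (PySem.List.dedup ts).Nodup := PySem.Set.nodup_ofList ts
  have hm : l ∈ PySem.List.dedup ts ↔ l ∈ ts := PySem.Set.mem_ofList ts l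
  rw [hmap, PySem.List.sum_map_add_int, pvSumIteSingle _ hnd l (pvW ts l * p)]
  simp only [hm]

theorem pvPref_append (zs : List (String × Int)) (lp : String × Int) :
    pvPref (zs ++ [lp]) = (pvPref zs).insert lp.1 ((pvPref zs).getD lp.1 0 + lp.2) := by
  unfold pvPref; rw [List.foldl_append]; rfl

theorem pvMainSum (ts : List String) (zs : List (String × Int)) :
    ((zs.filter (fun lp => decide (lp.1 ∈ ts))).map (fun lp => pvW ts lp.1 * lp.2)).sum
      = pvSB ts (pvPref zs) := by
  induction zs using List.reverseRecOn with
  | nil => simp [pvPref, pvSB, PySem.Dict.contains_empty]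
  | append_singleton zs lp ih =>
    rw [pvPref_append, pvSB_insert, ← ih, List.filter_append, List.map_append, List.sum_append]
    by_cases h : lp.1 ∈ ts <;> simp [h]

theorem pvContainsPref (zs : List (String × Int)) (t : String) :
    (pvPref zs).contains t = true ↔ t ∈ zs.map (·.1) := by
  rw [PySem.Dict.contains_iff_mem_keys]
  unfold pvPref
  rw [PySem.Dict.keys_foldl_insert_key zs (·.1) (fun d lp => d.getD lp.1 0 + lp.2) PySem.Dict.empty]
  rw [PySem.Dict.keys_empty, PySem.Set.update_nil_left]
  exact PySem.Set.mem_ofList _ _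

theorem pvEmptyEq (ts : List String) (zs : List (String × Int)) :
    ((PySem.List.dedup ts).filter (fun t => (pvPref zs).contains t)).isEmpty
      = (zs.filter (fun lp => decide (lp.1 ∈ ts))).isEmpty := by
  rw [Bool.eq_iff_iff]
  simp only [List.isEmpty_iff, List.filter_eq_nil_iff]
  constructor
  · intro h lp hlp hmem
    have := h lp.1 ((PySem.Set.mem_ofList ts lp.1).mpr (by simpa using hmem))
    exact this ((pvContainsPref zs lp.1).mpr (List.mem_map_of_mem hlp))
  · intro h t ht hc
    obtain ⟨lp, hlp, rfl⟩ := List.mem_map.mp ((pvContainsPref zs _).mp hc)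
    exact h lp hlp (by simpa using (PySem.Set.mem_ofList ts lp.1).mp ht)

theorem pvRow (zs : List (String × Int)) (ts : List String) (d : PySem.Dict String Int) :
    zs.foldl (fun answer lp =>
        if lp.1 ∈ ts then
          answer.insert (ts.headD "")
            (answer.getD (ts.headD "") 0 +
              (6 - (((PySem.List.index? ts lp.1).getD 0 : Nat) : Int)) * lp.2)
        else answer) d
    = (if ((PySem.List.dedup ts).filter (fun t => (pvPref zs).contains t)).isEmpty then d
       else d.insert (ts.headD "")
         (d.getD (ts.headD "") 0 +
           (((PySem.List.dedup ts).filter (fun t => (pvPref zs).contains t)).map (fun t =>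
             (6 - (((PySem.List.index? ts t).getD 0 : Nat) : Int)) * (pvPref zs).getD t 0)).sum)) := by
  rw [PySem.List.foldl_ite_eq_foldl_filter (fun lp : String × Int => lp.1 ∈ ts)
        (fun answer lp =>
          answer.insert (ts.headD "")
            (answer.getD (ts.headD "") 0 +
              (6 - (((PySem.List.index? ts lp.1).getD 0 : Nat) : Int)) * lp.2)) zs d]
  rw [pvFoldKey (ts.headD "") (fun lp : String × Int =>
        (6 - (((PySem.List.index? ts lp.1).getD 0 : Nat) : Int)) * lp.2)]
  rw [pvEmptyEq ts zs]
  have hsum : ((zs.filter (fun lp => decide (lp.1 ∈ ts))).map (fun lp : String × Int =>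
        (6 - (((PySem.List.index? ts lp.1).getD 0 : Nat) : Int)) * lp.2)).sum
      = (((PySem.List.dedup ts).filter (fun t => (pvPref zs).contains t)).map (fun t =>
          (6 - (((PySem.List.index? ts t).getD 0 : Nat) : Int)) * (pvPref zs).getD t 0)).sum := by
    rw [show (fun lp : String × Int => (6 - (((PySem.List.index? ts lp.1).getD 0 : Nat) : Int)) * lp.2)
          = (fun lp : String × Int => pvW ts lp.1 * lp.2) from rfl]
    rw [pvMainSum, pvSumFilter, pvSB]
    apply congrArg
    apply List.map_congr_left
    intro t _
    by_cases h : (pvPref zs).contains t <;> simp [h, pvW]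
  rw [hsum]

theorem pvMainEq (table : List String) (languages : List String) (preference : List Int) :
    (let pref := pvPref (languages.zip preference)
     table.foldl (fun answer row =>
      let tokens := PySem.Str.split₀ row
      let matched := (PySem.List.dedup tokens).filter (fun t => pref.contains t)
      if matched.isEmpty then answer
      else
        let gain := (matched.map (fun t =>
          (6 - (((PySem.List.index? tokens t).getD 0 : Nat) : Int)) * pref.getD t 0)).sum
        answer.insert (tokens.headD "") (answer.getD (tokens.headD "") 0 + gain)) PySem.Dict.empty)
    = table.foldl (fun answer score_str =>
      let score_list := PySem.Str.split₀ score_str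
      (languages.zip preference).foldl (fun answer lp =>
        if lp.1 ∈ score_list then
          answer.insert (score_list.headD "")
            (answer.getD (score_list.headD "") 0 +
              (6 - (((PySem.List.index? score_list lp.1).getD 0 : Nat) : Int)) * lp.2)
        else answer) answer) PySem.Dict.empty := by
  have h : (fun (answer : PySem.Dict String Int) (row : String) =>
      let tokens := PySem.Str.split₀ row
      let matched := (PySem.List.dedup tokens).filter (fun t => (pvPref (languages.zip preference)).contains t)
      if matched.isEmpty then answer
      else
        let gain := (matched.map (fun t =>
          (6 - (((PySem.List.index? tokens t).getD 0 : Nat) : Int)) * (pvPref (languages.zip preference)).getD t 0)).sum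
        answer.insert (tokens.headD "") (answer.getD (tokens.headD "") 0 + gain))
      = (fun (answer : PySem.Dict String Int) (score_str : String) =>
      let score_list := PySem.Str.split₀ score_str
      (languages.zip preference).foldl (fun answer lp =>
        if lp.1 ∈ score_list then
          answer.insert (score_list.headD "")
            (answer.getD (score_list.headD "") 0 +
              (6 - (((PySem.List.index? score_list lp.1).getD 0 : Nat) : Int)) * lp.2)
        else answer) answer) := by
    funext d row
    exact (pvRow (languages.zip preference) (PySem.Str.split₀ row) d).symm
  exact congrArg (fun f => List.foldl f PySem.Dict.empty table) h

-- ===== VERDICT (by name: the statement is the Claim_ definition above) =====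
theorem solution_spec : Claim_equal_solution := by
  intro table languages preference _ _
  unfold Spec_solution solution solution_alt
  exact congrArg (fun ans : PySem.Dict String Int =>
    ((PySem.List.sorted2 ans.items (fun x => -x.2) (fun x => x.1)).headD ("", 0)).1)
    (pvMainEq table languages preference).symm
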